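-- pv_equiv track=rewrite | github.com/Frn1/intro-programacion | Python/PseInt a Python/RegistroDeTemperaturas.py | temperaturas_a_texto
-- ===== SOURCE A (Python) =====
-- def temperaturas_a_texto(lista: list) -> str:
--     salida = ""
--     cantidad = len(lista)
--     for i in range(cantidad):
--         valor = f"{lista[i]} °C"
--         salida += valor
--         if i != cantidad - 1:
--             if i == cantidad - 2:
--                 salida += " y "
--             else:
--                 salida += ", "
--     return salida
-- ===== SOURCE B (Python) =====
-- def temperaturas_a_texto(lista: list) -> str:
--     partes = [f"{valor} °C" for valor in lista]
--     if not partes: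
--         return ""
--     if len(partes) == 1:
--         return partes[0]
--     return ", ".join(partes[:-1]) + " y " + partes[-1]
-- ===== Notes on version B (the rewrite author's own statement) =====
-- stated objective: simpler
-- what changed: Replaces the index-based loop with a per-element separator branch (comparing i against len-1 and len-2) by mapping to formatted pieces and composing the result from a slice: join all but the last piece with ', ' and append ' y ' plus the last piece, with no per-element conditionals.
import Mathlib
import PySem

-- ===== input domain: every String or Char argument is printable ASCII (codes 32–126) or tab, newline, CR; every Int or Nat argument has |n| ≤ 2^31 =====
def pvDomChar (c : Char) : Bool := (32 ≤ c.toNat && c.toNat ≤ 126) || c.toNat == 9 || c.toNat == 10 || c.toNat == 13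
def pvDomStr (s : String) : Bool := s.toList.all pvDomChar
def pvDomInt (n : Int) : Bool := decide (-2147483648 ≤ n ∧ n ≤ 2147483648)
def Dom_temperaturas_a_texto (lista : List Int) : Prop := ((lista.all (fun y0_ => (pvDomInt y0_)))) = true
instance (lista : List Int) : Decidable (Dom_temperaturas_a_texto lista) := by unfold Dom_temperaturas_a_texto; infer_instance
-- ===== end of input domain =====

-- B formats each value once and composes the result by join on a slice plus the last piece,
-- instead of A's indexed loop with a per-element separator branch. Objective: simpler.


-- ===== PORT A =====
-- lista[i] is ported as pyGetD (index always in range 0..cantidad-1, where it equals lista[i])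
def temperaturas_a_texto (lista : List Int) : String :=
  let cantidad : Int := lista.length
  (PySem.List.pyRange 0 cantidad 1).foldl (fun salida i =>
    let valor := PySem.Int.toStr (PySem.List.pyGetD lista i 0) ++ " °C"
    let salida := salida ++ valor
    if i ≠ cantidad - 1 then
      if i = cantidad - 2 then salida ++ " y " else salida ++ ", "
    else salida) ""

-- ===== PORT B =====
-- partes[-1] is ported as pyGetD (list nonempty on that branch, where it equals partes[-1])
def temperaturas_a_texto_alt (lista : List Int) : String :=
  let partes := lista.map (fun valor => PySem.Int.toStr valor ++ " °C")
  if partes = [] then ""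
  else if partes.length = 1 then PySem.List.pyGetD partes 0 ""
  else PySem.Str.join ", " (PySem.List.slice partes none (some (-1))) ++ " y " ++
       PySem.List.pyGetD partes (-1) ""

-- ===== PRECONDITION & SPEC =====
def Spec_temperaturas_a_texto (lista : List Int) (out : String) : Prop := out = temperaturas_a_texto_alt lista
instance (lista : List Int) (out : String) : Decidable (Spec_temperaturas_a_texto lista out) := by unfold Spec_temperaturas_a_texto; infer_instance

-- ===== CLAIM (what is proved, stated in full; the proofs are below) =====
def Claim_equal_temperaturas_a_texto : Prop := ∀ (lista : List Int), Dom_temperaturas_a_texto lista → Spec_temperaturas_a_texto lista (temperaturas_a_texto lista)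

-- ===== LEMMAS AND PROOFS =====

-- common reference form of the output, recursing on the list
def pvRef : List Int → String
  | [] => ""
  | [v] => PySem.Int.toStr v ++ " °C"
  | v :: w :: rest =>
      PySem.Int.toStr v ++ " °C" ++ (if rest = [] then " y " else ", ") ++ pvRef (w :: rest)

-- the string appended by A's loop body at index i
def pvPiece (lista : List Int) (n i : Int) : String :=
  PySem.Int.toStr (PySem.List.pyGetD lista i 0) ++ " °C" ++
    (if i = n - 1 then "" else if i = n - 2 then " y " else ", ")

theorem pv_foldl_acc (g : Int → String) (l : List Int) (acc : String) :
    l.foldl (fun s i => s ++ g i) acc = acc ++ l.foldl (fun s i => s ++ g i) "" := by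
  induction l generalizing acc with
  | nil => simp
  | cons h t ih => simp only [List.foldl_cons]; rw [ih, ih ("" ++ g h)]; simp [String.append_assoc]

theorem pv_foldl_congr {α β : Type} (l : List α) (f f' : β → α → β) (acc : β)
    (h : ∀ x ∈ l, ∀ s, f s x = f' s x) : l.foldl f acc = l.foldl f' acc := by
  induction l generalizing acc with
  | nil => rfl
  | cons x t ih =>
      simp only [List.foldl_cons]; rw [h x (by simp)]
      exact ih _ (fun y hy s => h y (by simp [hy]) s)

theorem pv_step (lista : List Int) (n : Int) (s : String) (i : Int) :
    (if i ≠ n - 1 then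
       if i = n - 2 then (s ++ (PySem.Int.toStr (PySem.List.pyGetD lista i 0) ++ " °C")) ++ " y "
       else (s ++ (PySem.Int.toStr (PySem.List.pyGetD lista i 0) ++ " °C")) ++ ", "
     else s ++ (PySem.Int.toStr (PySem.List.pyGetD lista i 0) ++ " °C")) = s ++ pvPiece lista n i := by
  unfold pvPiece
  split_ifs <;> simp_all [String.append_assoc]

theorem pv_piece_shift (v : Int) (tl : List Int) (k : Nat) (_hk : k < tl.length) :
    pvPiece (v :: tl) ((tl.length : Int) + 1) (1 + (k : Int)) = pvPiece tl (tl.length : Int) ((k : Int)) := by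
  unfold pvPiece
  have hget : PySem.List.pyGetD (v :: tl) (1 + (k : Int)) 0 = PySem.List.pyGetD tl (k : Int) 0 := by
    have h1 : (1 + (k : Int)) = ((k + 1 : Nat) : Int) := by push_cast; ring
    rw [h1, PySem.List.pyGetD_natCast, PySem.List.pyGetD_natCast]; rfl
  have h2 : ((1 : Int) + (k : Int) = ((tl.length : Int) + 1) - 1) = ((k : Int) = (tl.length : Int) - 1) := by
    apply propext; omega
  have h3 : ((1 : Int) + (k : Int) = ((tl.length : Int) + 1) - 2) = ((k : Int) = (tl.length : Int) - 2) := by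
    apply propext; omega
  simp only [hget, h2, h3]

theorem pv_A_core : ∀ lista : List Int,
    (PySem.List.pyRange 0 (lista.length : Int) 1).foldl
      (fun s i => s ++ pvPiece lista (lista.length : Int) i) "" = pvRef lista := by
  intro lista
  induction lista with
  | nil => simp [PySem.List.pyRange_one_eq_nil, pvRef]
  | cons v tl ih =>
      have hlen : ((v :: tl).length : Int) = (tl.length : Int) + 1 := by simp
      rw [hlen, PySem.List.pyRange_one_cons (by positivity)]
      simp only [List.foldl_cons]
      rw [pv_foldl_acc]
      have hshift :
          (PySem.List.pyRange (0 + 1) ((tl.length : Int) + 1) 1).foldl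
            (fun s i => s ++ pvPiece (v :: tl) ((tl.length : Int) + 1) i) "" = pvRef tl := by
        rw [show ((0 : Int) + 1) = 1 by ring, PySem.List.pyRange_one 1 ((tl.length : Int) + 1)]
        rw [show (((tl.length : Int) + 1) - 1).toNat = tl.length by omega]
        rw [List.foldl_map]
        rw [pv_foldl_congr (List.range tl.length)
              (fun s (k : Nat) => s ++ pvPiece (v :: tl) ((tl.length : Int) + 1) (1 + (k : Int)))
              (fun s (k : Nat) => s ++ pvPiece tl (tl.length : Int) ((k : Int))) ""
              (fun k hk s =>
                show s ++ pvPiece (v :: tl) ((tl.length : Int) + 1) (1 + (k : Int)) =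
                     s ++ pvPiece tl (tl.length : Int) ((k : Int)) from
                by rw [pv_piece_shift v tl k (List.mem_range.mp hk)])]
        rw [← List.foldl_map (f := fun k : Nat => (k : Int))
              (g := fun s i => s ++ pvPiece tl (tl.length : Int) i)]
        rw [show (List.range tl.length).map (fun k : Nat => (k : Int)) =
              PySem.List.pyRange 0 (tl.length : Int) 1 by
            rw [PySem.List.pyRange_one]; simp]
        exact ih
      rw [hshift]
      cases tl with
      | nil => simp [pvPiece, pvRef]
      | cons w rest =>
          unfold pvPiece
          have hg : PySem.List.pyGetD (v :: w :: rest) 0 0 = v := by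
            rw [show (0 : Int) = ((0 : Nat) : Int) by simp, PySem.List.pyGetD_natCast]; rfl
          have hne : ¬ ((0 : Int) = (((w :: rest).length : Int) + 1) - 1) := by simp; omega
          have heq : ((0 : Int) = (((w :: rest).length : Int) + 1) - 2) = (rest = []) := by
            apply propext
            constructor
            · intro h; cases rest with
              | nil => rfl
              | cons r rs => exfalso; simp at h; omega
            · intro h; subst h; simp
          simp only [hg, if_neg hne, heq]
          by_cases hr : rest = [] <;> simp [hr, pvRef, String.append_assoc]

theorem pv_A_eq_ref (lista : List Int) : temperaturas_a_texto lista = pvRef lista := by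
  unfold temperaturas_a_texto
  rw [pv_foldl_congr _ _ (fun s i => s ++ pvPiece lista (lista.length : Int) i) ""
        (fun i _hi s => pv_step lista (lista.length : Int) s i)]
  exact pv_A_core lista

theorem pv_join_cons (sep x : String) (ys : List String) (hy : ys ≠ []) :
    PySem.Str.join sep (x :: ys) = x ++ sep ++ PySem.Str.join sep ys := by
  apply String.toList_inj.mp
  obtain ⟨z, zs, rfl⟩ := List.exists_cons_of_ne_nil hy
  simp [PySem.Str.toList_join, PySem.Chars.join_cons_cons]

theorem pv_join_singleton (sep x : String) : PySem.Str.join sep [x] = x := by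
  apply String.toList_inj.mp; simp [PySem.Str.toList_join, PySem.Chars.join_singleton]

theorem pv_pyGetD_neg_one (x : String) (xs : List String) (d : String) :
    PySem.List.pyGetD (x :: xs) (-1) d = (x :: xs).getLastD d := by
  simp [PySem.List.pyGetD, PySem.List.pyGet?, PySem.List.pyIdx?, List.getLastD_eq_getLast?,
    List.getLast?_eq_getElem?]

theorem pv_B_core (v w : Int) (rest : List Int) :
    PySem.Str.join ", "
        (List.dropLast ((PySem.Int.toStr v ++ " °C") :: (PySem.Int.toStr w ++ " °C") ::
          rest.map (fun valor => PySem.Int.toStr valor ++ " °C"))) ++ " y " ++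
      List.getLastD ((PySem.Int.toStr v ++ " °C") :: (PySem.Int.toStr w ++ " °C") ::
          rest.map (fun valor => PySem.Int.toStr valor ++ " °C")) "" = pvRef (v :: w :: rest) := by
  induction rest generalizing v w with
  | nil => simp [pv_join_singleton, pvRef, String.append_assoc]
  | cons r rs ih =>
      rw [List.dropLast_cons₂]
      rw [pv_join_cons _ _ _ (by simp)]
      have hlast : List.getLastD ((PySem.Int.toStr v ++ " °C") :: (PySem.Int.toStr w ++ " °C") ::
          (r :: rs).map (fun valor => PySem.Int.toStr valor ++ " °C")) "" =
          List.getLastD ((PySem.Int.toStr w ++ " °C") ::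
          (r :: rs).map (fun valor => PySem.Int.toStr valor ++ " °C")) "" := by
        simp [List.getLastD_eq_getLast?, List.getLast?_cons_cons]
      rw [hlast]
      have := ih w r
      simp only [List.map_cons] at this ⊢
      rw [show pvRef (v :: w :: r :: rs) =
            PySem.Int.toStr v ++ " °C" ++ ", " ++ pvRef (w :: r :: rs) by simp [pvRef]]
      rw [← this]
      simp [String.append_assoc]

theorem pv_B_eq_ref (lista : List Int) : temperaturas_a_texto_alt lista = pvRef lista := by
  match lista with
  | [] => rfl
  | [v] =>
      unfold temperaturas_a_texto_alt
      simp [pvRef]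
  | v :: w :: rest =>
      unfold temperaturas_a_texto_alt
      simp only [List.map_cons]
      rw [if_neg (by simp), if_neg (by simp)]
      rw [PySem.List.slice_to_neg_one, pv_pyGetD_neg_one]
      exact pv_B_core v w rest

-- ===== VERDICT (by name: the statement is the Claim_ definition above) =====
theorem temperaturas_a_texto_spec : Claim_equal_temperaturas_a_texto := by
  intro lista _
  unfold Spec_temperaturas_a_texto
  rw [pv_A_eq_ref, pv_B_eq_ref]
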